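-- pv_equiv track=rewrite | github.com/Claudiu1995/CN_3 | prod_matr.py | get_val_line_pairs_from
-- ===== SOURCE A (Python) =====
-- def get_val_line_pairs_from(matrix: tuple, column: int) -> list:
--     diagonal = matrix[0]
--     vector = matrix[1]
--
--     val_col_pairs = []
--     last_line = 0
--     for i in range(0, len(vector)):
--         if vector[i][1] < 0:
--             last_line = -vector[i][1]
--         elif vector[i][1] == column:
--             val_col_pairs.append((vector[i][0], last_line))
--         elif last_line == column:
--             val_col_pairs.append((diagonal[last_line - 1], last_line))
--     return val_col_pairs
-- ===== SOURCE B (Python) =====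
-- def get_val_line_pairs_from(matrix: tuple, column: int) -> list:
--     diagonal, vector = matrix
--
--     # Pass 1: split the sparse vector into groups of consecutive non-marker
--     # entries, each tagged with its line number (negative entries are markers;
--     # the implicit first group has line 0).
--     groups = []
--     line, cur = 0, []
--     for e in vector:
--         if e[1] < 0:
--             groups.append((line, cur))
--             line, cur = -e[1], []
--         else:
--             cur.append(e)
--     groups.append((line, cur))
--
--     # Pass 2: emit pairs per group; the line==column test is decided once per
--     # group instead of once per entry.
--     result = []
--     for line, entries in groups:
--         if line == column:
--             result.extend((e[0], line) if e[1] == column else (diagonal[line - 1], line)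
--                           for e in entries)
--         else:
--             result.extend((e[0], line) for e in entries if e[1] == column)
--     return result
-- ===== Notes on version B (the rewrite author's own statement) =====
-- stated objective: alternative
-- what changed: Replaces the flat stateful index-loop (last_line updated per entry, tested per entry) by a two-level grouped pass: first split the vector into marker-delimited groups tagged with their line, then emit the column's pairs per group, deciding line==column once per group via map/filter.
import Mathlib
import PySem

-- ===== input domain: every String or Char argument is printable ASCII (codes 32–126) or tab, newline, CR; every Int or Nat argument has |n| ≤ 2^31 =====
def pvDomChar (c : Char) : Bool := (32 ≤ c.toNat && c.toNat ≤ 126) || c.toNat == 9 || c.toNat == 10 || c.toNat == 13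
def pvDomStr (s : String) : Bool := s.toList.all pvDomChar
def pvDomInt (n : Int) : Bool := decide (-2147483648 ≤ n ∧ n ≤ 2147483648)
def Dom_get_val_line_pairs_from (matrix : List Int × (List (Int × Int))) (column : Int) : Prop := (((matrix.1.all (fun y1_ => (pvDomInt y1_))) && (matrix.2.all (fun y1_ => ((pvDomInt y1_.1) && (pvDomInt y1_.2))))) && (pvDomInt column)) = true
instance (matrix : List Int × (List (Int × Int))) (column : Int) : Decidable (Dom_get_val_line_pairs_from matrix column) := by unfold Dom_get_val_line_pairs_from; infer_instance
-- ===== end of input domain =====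

-- B replaces A's flat stateful scan by a two-level grouped pass (split into
-- marker-delimited groups, then emit per group); objective: alternative
-- decomposition, same cost.

-- ===== PORT A =====
-- the body of A's for-loop over range(len(vector)); state = (val_col_pairs, last_line)
def pvStepA (diagonal : List Int) (column : Int)
    (st : List (Int × Int) × Int) (e : Int × Int) : List (Int × Int) × Int :=
  if e.2 < 0 then (st.1, -e.2)
  else if e.2 == column then (st.1 ++ [(e.1, st.2)], st.2)
  else if st.2 == column then
    (st.1 ++ [((PySem.List.pyGet? diagonal (st.2 - 1)).getD 0, st.2)], st.2)
  else st

def get_val_line_pairs_from (matrix : List Int × (List (Int × Int))) (column : Int) : List (Int × Int) :=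
  let diagonal := matrix.1
  let vector := matrix.2
  ((PySem.List.pyRange 0 vector.length 1).foldl
      (fun st i => pvStepA diagonal column st (PySem.List.pyGetD vector i (0, 0)))
      ([], 0)).1

-- ===== PORT B =====
-- pass 1: split vector into (line, entries) groups delimited by negative markers
def pvGroups : List (Int × Int) → Int → List (Int × Int) → List (Int × List (Int × Int))
  | [], line, cur => [(line, cur)]
  | e :: rest, line, cur =>
    if e.2 < 0 then (line, cur) :: pvGroups rest (-e.2) []
    else pvGroups rest line (cur ++ [e])

-- pass 2: the pairs one group contributes for `column`
def pvEmit (diagonal : List Int) (column : Int) (g : Int × List (Int × Int)) : List (Int × Int) :=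
  if g.1 == column then
    g.2.map (fun e => if e.2 == column then (e.1, g.1)
                      else ((PySem.List.pyGet? diagonal (g.1 - 1)).getD 0, g.1))
  else (g.2.filter (fun e => e.2 == column)).map (fun e => (e.1, g.1))

def get_val_line_pairs_from_alt (matrix : List Int × (List (Int × Int))) (column : Int) : List (Int × Int) :=
  ((pvGroups matrix.2 0 []).map (pvEmit matrix.1 column)).flatten

-- ===== PRECONDITION & SPEC =====
-- the "current line" in force at entry index i (last negative marker before i, else 0)
def pvLineAt (v : List (Int × Int)) (i : Nat) : Int :=
  (v.take i).foldl (fun L e => if e.2 < 0 then -e.2 else L) 0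

-- Pre_ excludes exactly the inputs on which Python A raises IndexError: a
-- non-marker, non-column entry reached while the current line equals `column`
-- forces the access diagonal[column-1], which must be a valid Python index.
def Pre_get_val_line_pairs_from (matrix : List Int × (List (Int × Int))) (column : Int) : Prop :=
  ∀ i : Nat, (h : i < matrix.2.length) →
    (0 ≤ (matrix.2[i]'h).2 ∧ (matrix.2[i]'h).2 ≠ column ∧ pvLineAt matrix.2 i = column) →
    (1 - (matrix.1.length : Int) ≤ column ∧ column ≤ (matrix.1.length : Int))

instance (matrix : List Int × (List (Int × Int))) (column : Int) : Decidable (Pre_get_val_line_pairs_from matrix column) := by unfold Pre_get_val_line_pairs_from; infer_instance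

def pvWitness_get_val_line_pairs_from : (List Int × (List (Int × Int))) × Int :=
  (([3, 4], [(7, 1), (2, -2), (5, 1), (6, 2)]), 1)

def Spec_get_val_line_pairs_from (matrix : List Int × (List (Int × Int))) (column : Int) (out : List (Int × Int)) : Prop := out = get_val_line_pairs_from_alt matrix column
instance (matrix : List Int × (List (Int × Int))) (column : Int) (out : List (Int × Int)) : Decidable (Spec_get_val_line_pairs_from matrix column out) := by unfold Spec_get_val_line_pairs_from; infer_instance

-- ===== CLAIM (what is proved, stated in full; the proofs are below) =====
def Claim_equal_get_val_line_pairs_from : Prop := ∀ (matrix : List Int × (List (Int × Int))) (column : Int), Dom_get_val_line_pairs_from matrix column → Pre_get_val_line_pairs_from matrix column → Spec_get_val_line_pairs_from matrix column (get_val_line_pairs_from matrix column)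

-- ===== LEMMAS AND PROOFS =====

-- the common recursive specification both ports are reduced to
def pvSpecF (d : List Int) (c : Int) : List (Int × Int) → Int → List (Int × Int)
  | [], _ => []
  | e :: r, L =>
    if e.2 < 0 then pvSpecF d c r (-e.2)
    else if e.2 = c then (e.1, L) :: pvSpecF d c r L
    else if L = c then ((PySem.List.pyGet? d (L - 1)).getD 0, L) :: pvSpecF d c r L
    else pvSpecF d c r L

theorem pvFoldA_eq (d : List Int) (c : Int) :
    ∀ (v : List (Int × Int)) (acc : List (Int × Int)) (L : Int),
      (v.foldl (pvStepA d c) (acc, L)).1 = acc ++ pvSpecF d c v L := by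
  intro v
  induction v with
  | nil => intro acc L; simp [pvSpecF]
  | cons e r ih =>
    intro acc L
    simp only [List.foldl_cons, pvStepA, pvSpecF]
    by_cases h1 : e.2 < 0
    · simp [h1, ih]
    · by_cases h2 : e.2 = c
      · subst h2; simp [h1, ih]
      · by_cases h3 : L = c
        · simp [h1, h2, h3, ih]
        · simp [h1, h2, h3, ih]

theorem pvEmit_append (d : List Int) (c L : Int) (a b : List (Int × Int)) :
    pvEmit d c (L, a ++ b) = pvEmit d c (L, a) ++ pvEmit d c (L, b) := by
  by_cases h : L = c <;> simp [pvEmit, h]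

theorem pvGroups_eq (d : List Int) (c : Int) :
    ∀ (v : List (Int × Int)) (L : Int) (cur : List (Int × Int)),
      ((pvGroups v L cur).map (pvEmit d c)).flatten
        = pvEmit d c (L, cur) ++ pvSpecF d c v L := by
  intro v
  induction v with
  | nil => intro L cur; simp [pvGroups, pvSpecF]
  | cons e r ih =>
    intro L cur
    simp only [pvGroups, pvSpecF]
    by_cases h1 : e.2 < 0
    · simp only [h1, if_true]
      simp [ih, pvEmit]
    · simp only [h1, if_false]
      rw [ih, pvEmit_append]
      by_cases h2 : e.2 = c
      · by_cases h3 : L = c <;> simp [h2, h3, pvEmit]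
      · by_cases h3 : L = c <;> simp [h2, h3, pvEmit]

-- ===== VERDICT (by name: the statement is the Claim_ definition above) =====
theorem get_val_line_pairs_from_spec : Claim_equal_get_val_line_pairs_from := by
  intro matrix column _ _
  unfold Spec_get_val_line_pairs_from get_val_line_pairs_from get_val_line_pairs_from_alt
  dsimp only []
  rw [PySem.List.foldl_pyRange_zero_pyGetD' matrix.2 ((0 : Int), (0 : Int))
        (pvStepA matrix.1 column) (([], 0) : List (Int × Int) × Int)]
  rw [pvFoldA_eq, pvGroups_eq]
  simp [pvEmit]
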